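-- pv_equiv track=rewrite | github.com/Joaoguzman/PROYECTO_ABACO_DIGITAL | crea_tablero.py | actualiza
-- ===== SOURCE A (Python) =====
-- def cambia_digito(digito):
--     if digito == 1:
--         return 8
--     elif digito == 2:
--         return 7
--     elif digito == 3:
--         return 6
--     elif digito == 4:
--         return 5
--     elif digito == 5:
--         return 4
--     elif digito == 6:
--         return 3
--     elif digito == 7:
--         return 2
--     elif digito == 8:
--         return 1
--     elif digito == 9:
--         return 0
--     elif digito == 0:
--         return 10
--
-- def actualiza(diccionario,numero):
--     cont_numero = 0
--     auxiliar = 0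
--
--     for clave in range(0,len(numero)):
--         abaco = []
--         for estado in range(0,11):
--             if estado == 0 :
--                 abaco.append("   +   ")
--             elif estado == 10:
--                 abaco.append("   {}   ".format(numero[cont_numero]))
--             elif estado >=1 and estado <=cambia_digito(numero[cont_numero]):
--                 abaco.append("  | |  ")
--             else:
--                 abaco.append(" ##### ")
--         cont_numero = cont_numero + 1
--         diccionario[clave] = abaco
--     return diccionario
-- ===== SOURCE B (Python) =====
-- def cambia_digito(digito):
--     if digito == 1:
--         return 8
--     elif digito == 2:
--         return 7
--     elif digito == 3:
--         return 6
--     elif digito == 4: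
--         return 5
--     elif digito == 5:
--         return 4
--     elif digito == 6:
--         return 3
--     elif digito == 7:
--         return 2
--     elif digito == 8:
--         return 1
--     elif digito == 9:
--         return 0
--     elif digito == 0:
--         return 10
--
--
-- def actualiza(diccionario, numero):
--     for clave, d in enumerate(numero):
--         bars = min(cambia_digito(d), 9)
--         diccionario[clave] = (["   +   "]
--                               + ["  | |  "] * bars
--                               + [" ##### "] * (9 - bars)
--                               + ["   {}   ".format(d)])
--     return diccionario
-- ===== Notes on version B (the rewrite author's own statement) =====
-- stated objective: simpler
-- what changed: Replaces the 11-iteration inner branch loop and the redundant cont_numero/auxiliar counters with a direct construction of each column by list concatenation/replication from bars = min(cambia_digito(d), 9).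
import Mathlib
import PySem

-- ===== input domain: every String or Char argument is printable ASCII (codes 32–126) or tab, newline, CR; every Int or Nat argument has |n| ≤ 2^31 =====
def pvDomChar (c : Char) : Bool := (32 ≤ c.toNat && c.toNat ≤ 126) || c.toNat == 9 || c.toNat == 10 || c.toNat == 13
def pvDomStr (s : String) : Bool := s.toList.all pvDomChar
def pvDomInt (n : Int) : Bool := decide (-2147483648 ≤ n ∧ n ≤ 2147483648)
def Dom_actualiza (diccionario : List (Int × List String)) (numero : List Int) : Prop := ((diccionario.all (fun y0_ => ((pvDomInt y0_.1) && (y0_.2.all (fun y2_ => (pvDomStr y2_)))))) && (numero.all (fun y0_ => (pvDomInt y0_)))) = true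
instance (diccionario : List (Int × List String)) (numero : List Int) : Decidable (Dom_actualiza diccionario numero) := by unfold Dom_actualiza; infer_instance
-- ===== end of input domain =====

-- B builds each abacus column directly by concatenation from bars = min(cambia_digito(d), 9)
-- instead of A's 11-iteration branch loop and cont_numero counter (objective: simpler). Note:
-- the Python A mutates `diccionario` in place; B performs the same mutation, and the
-- equivalence here is about the returned value.

-- ===== PORT A =====
-- shared module helper, used verbatim by both Source A and Source B
def cambia_digito (digito : Int) : Option Int :=
  if digito == 1 then some 8
  else if digito == 2 then some 7
  else if digito == 3 then some 6
  else if digito == 4 then some 5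
  else if digito == 5 then some 4
  else if digito == 6 then some 3
  else if digito == 7 then some 2
  else if digito == 8 then some 1
  else if digito == 9 then some 0
  else if digito == 0 then some 10
  else none

-- `estado <= cambia_digito(d)`: Python raises TypeError when cambia_digito gives None;
-- those inputs are excluded by Pre_actualiza, so the `none` branch value is never relied on.
def actualiza (diccionario : List (Int × List String)) (numero : List Int) : List (Int × List String) :=
  let r := (PySem.List.pyRange 0 (numero.length : Int) 1).foldl
    (fun (st : Int × PySem.Dict Int (List String)) clave =>
      let cont_numero := st.1
      let d := (PySem.List.pyGet? numero cont_numero).getD 0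
      let abaco := (PySem.List.pyRange 0 11 1).foldl
        (fun (ab : List String) estado =>
          if estado == 0 then ab ++ ["   +   "]
          else if estado == 10 then ab ++ ["   " ++ PySem.Int.toStr d ++ "   "]
          else if 1 ≤ estado ∧ estado ≤ (cambia_digito d).getD (-1) then ab ++ ["  | |  "]
          else ab ++ [" ##### "]) []
      (cont_numero + 1, PySem.Dict.insert st.2 clave abaco))
    ((0 : Int), PySem.Dict.mk diccionario)
  r.2.items

-- ===== PORT B =====
-- `min(cambia_digito(d), 9)` raises TypeError when cambia_digito gives None; those inputs
-- are excluded by Pre_actualiza, so the `.getD 0` default is never relied on.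
def actualiza_alt (diccionario : List (Int × List String)) (numero : List Int) : List (Int × List String) :=
  ((PySem.List.enumerate numero).foldl
    (fun (dicc : PySem.Dict Int (List String)) cd =>
      let bars := min ((cambia_digito cd.2).getD 0) 9
      PySem.Dict.insert dicc (cd.1 : Int)
        (["   +   "] ++ List.replicate bars.toNat "  | |  "
          ++ List.replicate (9 - bars).toNat " ##### "
          ++ ["   " ++ PySem.Int.toStr cd.2 ++ "   "]))
    (PySem.Dict.mk diccionario)).items

-- ===== PRECONDITION & SPEC =====
-- A raises TypeError for any digit outside 0..9 (cambia_digito returns None there);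
-- B raises there too, so those inputs stay outside Pre_.
def Pre_actualiza (diccionario : List (Int × List String)) (numero : List Int) : Prop :=
  ∀ d ∈ numero, 0 ≤ d ∧ d ≤ 9
instance (diccionario : List (Int × List String)) (numero : List Int) : Decidable (Pre_actualiza diccionario numero) := by unfold Pre_actualiza; infer_instance
def pvWitness_actualiza : (List (Int × List String)) × List Int := ([(0, ["x"]), (1, ["y"])], [3, 0])

def Spec_actualiza (diccionario : List (Int × List String)) (numero : List Int) (out : List (Int × List String)) : Prop := out = actualiza_alt diccionario numero
instance (diccionario : List (Int × List String)) (numero : List Int) (out : List (Int × List String)) : Decidable (Spec_actualiza diccionario numero out) := by unfold Spec_actualiza; infer_instance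

-- ===== CLAIM =====
def Claim_equal_actualiza : Prop := ∀ (diccionario : List (Int × List String)) (numero : List Int), Dom_actualiza diccionario numero → Pre_actualiza diccionario numero → Spec_actualiza diccionario numero (actualiza diccionario numero)

-- ===== LEMMAS AND PROOFS =====

-- the column A builds for digit d, and the one B builds
def colA (d : Int) : List String :=
  (PySem.List.pyRange 0 11 1).foldl
    (fun (ab : List String) estado =>
      if estado == 0 then ab ++ ["   +   "]
      else if estado == 10 then ab ++ ["   " ++ PySem.Int.toStr d ++ "   "]
      else if 1 ≤ estado ∧ estado ≤ (cambia_digito d).getD (-1) then ab ++ ["  | |  "]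
      else ab ++ [" ##### "]) []

def colB (d : Int) : List String :=
  let bars := min ((cambia_digito d).getD 0) 9
  ["   +   "] ++ List.replicate bars.toNat "  | |  "
    ++ List.replicate (9 - bars).toNat " ##### "
    ++ ["   " ++ PySem.Int.toStr d ++ "   "]

theorem colA_eq_colB (d : Int) (h0 : 0 ≤ d) (h9 : d ≤ 9) : colA d = colB d := by
  interval_cases d <;> rfl

theorem dig_bounds (n : List Int) (hp : ∀ d ∈ n, 0 ≤ d ∧ d ≤ 9) (i : Int) :
    0 ≤ (PySem.List.pyGet? n i).getD 0 ∧ (PySem.List.pyGet? n i).getD 0 ≤ 9 := by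
  cases h : PySem.List.pyGet? n i with
  | none => simp
  | some x => simpa using hp x (PySem.List.mem_of_pyGet?_eq_some (xs := n) (i := i) h)

theorem fold_eq (n : List Int) (hp : ∀ d ∈ n, 0 ≤ d ∧ d ≤ 9) :
    ∀ (k : Nat) (c : Int) (dicc : PySem.Dict Int (List String)),
      ((PySem.List.pyRange c (c + k) 1).foldl
        (fun (st : Int × PySem.Dict Int (List String)) clave =>
          (st.1 + 1, PySem.Dict.insert st.2 clave
            (colA ((PySem.List.pyGet? n st.1).getD 0))))
        (c, dicc)).2
      = (PySem.List.pyRange c (c + k) 1).foldl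
          (fun (dicc : PySem.Dict Int (List String)) clave =>
            PySem.Dict.insert dicc clave (colB ((PySem.List.pyGet? n clave).getD 0)))
          dicc := by
  intro k
  induction k with
  | zero =>
    intro c dicc
    rw [PySem.List.pyRange_one_eq_nil (by omega)]
    simp
  | succ m ih =>
    intro c dicc
    rw [PySem.List.pyRange_one_cons (by omega)]
    simp only [List.foldl_cons]
    have hcol := colA_eq_colB _ (dig_bounds n hp c).1 (dig_bounds n hp c).2
    rw [hcol]
    have : c + (m + 1 : Nat) = (c + 1) + (m : Nat) := by push_cast; ring
    rw [this]
    exact ih (c + 1) _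

-- B folds over numero.enumerate; bridge that to the range fold the invariant is stated on
theorem enum_fold_eq (n : List Int) (dicc : PySem.Dict Int (List String)) :
    (PySem.List.enumerate n).foldl
      (fun (dicc : PySem.Dict Int (List String)) cd =>
        PySem.Dict.insert dicc (cd.1 : Int) (colB cd.2)) dicc
    = (PySem.List.pyRange 0 (n.length : Int) 1).foldl
        (fun (dicc : PySem.Dict Int (List String)) clave =>
          PySem.Dict.insert dicc clave (colB ((PySem.List.pyGet? n clave).getD 0)))
        dicc := by
  rw [PySem.List.enumerate_eq_map_pyRange (d := 0), List.foldl_map]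
  simp [PySem.List.pyGetD]

theorem actualiza_spec : Claim_equal_actualiza := by
  intro dicc n _ hpre
  unfold Spec_actualiza actualiza actualiza_alt
  dsimp only
  have h := fold_eq n hpre n.length (0 : Int) (PySem.Dict.mk dicc)
  simp only [zero_add] at h
  have he := enum_fold_eq n (PySem.Dict.mk dicc)
  simp only [colA, colB] at h he
  rw [h, ← he]
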